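-- pv_equiv track=rewrite | github.com/Alexey-T/CudaText | app/cudatext.app/Contents/Resources/py/cuda_sort/sort_ini.py | ini_sort_content
-- ===== SOURCE A (Python) =====
-- def ini_sort_content(lines, and_keys):
--     section = ''
--     sections = {}
--     for line in lines:
--         line = line.strip()
--         if line:
--             if line.startswith('['):
--                 section = line
--                 continue
--             if section:
--                 try:
--                     sections[section].append(line)
--                 except KeyError:
--                     sections[section] = [line, ]
--     if sections:
--         res = []
--         sk = list(sections.keys())
--         sk.sort()
--         for k in sk:
--             vals = sections[k]
--             if and_keys:
--                 vals.sort()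
--             res += [k]
--             res += vals
--             res += ['']
--         return res
-- ===== SOURCE B (Python) =====
-- def ini_sort_content(lines, and_keys):
--     # one flat pass collecting (section, line) pairs, then one stable sort + run-scan
--     pairs = []
--     section = ''
--     for line in lines:
--         line = line.strip()
--         if not line:
--             continue
--         if line.startswith('['):
--             section = line
--         elif section:
--             pairs.append((section, line))
--     if not pairs:
--         return None
--     pairs.sort(key=lambda p: p[0])  # stable: value order inside a section survives
--     res = []
--     i = 0
--     n = len(pairs)
--     while i < n:
--         k = pairs[i][0]
--         j = i
--         while j < n and pairs[j][0] == k: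
--             j += 1
--         vals = [v for _, v in pairs[i:j]]
--         if and_keys:
--             vals.sort()
--         res += [k] + vals + ['']
--         i = j
--     return res
-- ===== Notes on version B (the rewrite author's own statement) =====
-- stated objective: alternative
-- what changed: Instead of grouping lines into a dict keyed by section and then sorting the keys, B records flat (section, line) pairs in one pass, stably sorts them by section once, and emits each run of equal sections directly.
import Mathlib
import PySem

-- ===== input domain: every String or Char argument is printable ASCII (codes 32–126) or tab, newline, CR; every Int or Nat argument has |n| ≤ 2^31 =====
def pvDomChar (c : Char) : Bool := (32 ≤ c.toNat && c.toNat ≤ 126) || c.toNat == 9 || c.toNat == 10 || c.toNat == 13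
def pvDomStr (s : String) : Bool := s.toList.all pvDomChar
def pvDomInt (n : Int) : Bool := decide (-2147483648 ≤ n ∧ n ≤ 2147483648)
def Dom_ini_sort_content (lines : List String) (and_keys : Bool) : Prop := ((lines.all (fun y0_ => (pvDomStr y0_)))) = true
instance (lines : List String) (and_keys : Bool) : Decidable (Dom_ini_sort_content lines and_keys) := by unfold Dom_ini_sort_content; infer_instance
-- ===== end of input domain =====

-- B records flat (section, line) pairs in one pass, stably sorts them by section once and emits
-- runs of equal sections, instead of A's dict-of-lists keyed by section with a separate key sort.


-- ===== PORT A =====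
def ini_sort_content (lines : List String) (and_keys : Bool) : Option (List String) :=
  let st := lines.foldl (fun (st : String × PySem.Dict String (List String)) line =>
      let l := PySem.Str.strip line
      if l ≠ "" then
        if PySem.Str.startswith l "[" then (l, st.2)
        else if st.1 ≠ "" then
          -- try append / except KeyError create  =  sections[section] = sections.get(section, []) + [line]
          (st.1, st.2.modify st.1 [] (fun vs => vs ++ [l]))
        else st
      else st) ("", PySem.Dict.empty)
  let sections := st.2
  if sections.size ≠ 0 then
    let sk := PySem.List.sorted sections.keys (fun k => k)
    some (sk.foldl (fun res k =>
      let vals := sections.getD k []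
      let vals := if and_keys then PySem.List.sorted vals (fun v => v) else vals
      res ++ [k] ++ vals ++ [""]) [])
  else none

-- ===== PORT B =====
-- the run scan: outer while groups a maximal run of equal first components
def pvGroupRuns (ps : List (String × String)) : List (String × List String) :=
  match ps with
  | [] => []
  | (k, v) :: rest =>
    (k, v :: (rest.takeWhile (fun p => p.1 == k)).map (fun p => p.2)) ::
      pvGroupRuns (rest.dropWhile (fun p => p.1 == k))
termination_by ps.length
decreasing_by
  simp only [List.length_cons]
  exact Nat.lt_succ_of_le (List.length_dropWhile_le _ _)

def ini_sort_content_alt (lines : List String) (and_keys : Bool) : Option (List String) :=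
  let st := lines.foldl (fun (st : String × List (String × String)) line =>
      let l := PySem.Str.strip line
      if l = "" then st
      else if PySem.Str.startswith l "[" then (l, st.2)
      else if st.1 ≠ "" then (st.1, st.2 ++ [(st.1, l)])
      else st) ("", [])
  let pairs := st.2
  if pairs = [] then none
  else
    let sp := PySem.List.sorted pairs (fun p => p.1)
    some ((pvGroupRuns sp).foldl (fun res g =>
      res ++ ([g.1] ++ (if and_keys then PySem.List.sorted g.2 (fun v => v) else g.2) ++ [""])) [])

-- ===== PRECONDITION & SPEC =====
def Spec_ini_sort_content (lines : List String) (and_keys : Bool) (out : Option (List String)) : Prop := out = ini_sort_content_alt lines and_keys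
instance (lines : List String) (and_keys : Bool) (out : Option (List String)) : Decidable (Spec_ini_sort_content lines and_keys out) := by unfold Spec_ini_sort_content; infer_instance

-- ===== CLAIM (what is proved, stated in full; the proofs are below) =====
def Claim_equal_ini_sort_content : Prop := ∀ (lines : List String) (and_keys : Bool), Dom_ini_sort_content lines and_keys → Spec_ini_sort_content lines and_keys (ini_sort_content lines and_keys)

-- ===== LEMMAS AND PROOFS =====

def pvGDict (ps : List (String × String)) : PySem.Dict String (List String) :=
  ps.foldl (fun d p => d.modify p.1 [] (fun vs => vs ++ [p.2])) PySem.Dict.empty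
theorem pv_scan_rel (lines : List String) : ∀ (sec : String) (ps : List (String × String)),
    lines.foldl (fun (st : String × PySem.Dict String (List String)) line =>
      let l := PySem.Str.strip line
      if l ≠ "" then
        if PySem.Str.startswith l "[" then (l, st.2)
        else if st.1 ≠ "" then (st.1, st.2.modify st.1 [] (fun vs => vs ++ [l]))
        else st
      else st) (sec, pvGDict ps)
    = (let r := lines.foldl (fun (st : String × List (String × String)) line =>
        let l := PySem.Str.strip line
        if l = "" then st
        else if PySem.Str.startswith l "[" then (l, st.2)
        else if st.1 ≠ "" then (st.1, st.2 ++ [(st.1, l)])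
        else st) (sec, ps)
       (r.1, pvGDict r.2)) := by
  induction lines with
  | nil => intro sec ps; rfl
  | cons line rest ih =>
    intro sec ps
    simp only [List.foldl_cons]
    by_cases hl : PySem.Str.strip line = ""
    · simp only [hl, ne_eq, not_true_eq_false, if_false]
      exact ih sec ps
    · simp only [hl, ne_eq, not_false_eq_true, if_true]
      by_cases hs : PySem.Str.startswith (PySem.Str.strip line) "[" = true
      · simp only [hs, if_true]; exact ih _ ps
      · simp only [hs, if_false, Bool.false_eq_true]
        by_cases hsec : sec = ""
        · simp only [hsec, not_true_eq_false, if_false]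
          exact ih "" ps
        · simp only [hsec, not_false_eq_true, if_true]
          have : (pvGDict ps).modify sec [] (fun vs => vs ++ [PySem.Str.strip line])
              = pvGDict (ps ++ [(sec, PySem.Str.strip line)]) := by
            simp [pvGDict, List.foldl_append]
          rw [this]; exact ih sec _

theorem pv_insertBy_pairwise {α κ : Type} [LinearOrder κ] (key : α → κ) (x : α) :
    ∀ (ys : List α), ys.Pairwise (fun a b => key a ≤ key b) →
    (PySem.List.insertBy (fun a b => decide (key a < key b)) x ys).Pairwise (fun a b => key a ≤ key b) := by
  intro ys
  induction ys with
  | nil => intro _; simp [PySem.List.insertBy]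
  | cons y ys ih =>
    intro h
    rw [List.pairwise_cons] at h
    simp only [PySem.List.insertBy]
    split
    · rename_i hlt
      simp only [decide_eq_true_eq] at hlt
      refine List.pairwise_cons.mpr ⟨?_, List.pairwise_cons.mpr h⟩
      intro b hb
      rcases List.mem_cons.mp hb with rfl | hb
      · exact hlt.le
      · exact le_of_lt (lt_of_lt_of_le hlt (h.1 b hb))
    · rename_i hnlt
      simp only [decide_eq_true_eq] at hnlt
      rw [not_lt] at hnlt
      refine List.pairwise_cons.mpr ⟨?_, ih h.2⟩
      intro b hb
      rw [PySem.List.mem_insertBy] at hb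
      rcases hb with rfl | hb
      · exact hnlt
      · exact h.1 b hb

theorem pv_filter_insertBy_ne {α κ : Type} [LinearOrder κ] [BEq κ] [LawfulBEq κ]
    (key : α → κ) (x : α) (k : κ) (hx : key x ≠ k) :
    ∀ (ys : List α),
    (PySem.List.insertBy (fun a b => decide (key a < key b)) x ys).filter (fun y => key y == k)
      = ys.filter (fun y => key y == k) := by
  intro ys
  induction ys with
  | nil => simp [PySem.List.insertBy, hx]
  | cons y ys ih =>
    simp only [PySem.List.insertBy]
    split
    · simp [List.filter_cons, hx]
    · simp only [List.filter_cons, ih]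

theorem pv_filter_insertBy_eq {α κ : Type} [LinearOrder κ] [BEq κ] [LawfulBEq κ]
    (key : α → κ) (x : α) :
    ∀ (ys : List α), ys.Pairwise (fun a b => key a ≤ key b) →
    (PySem.List.insertBy (fun a b => decide (key a < key b)) x ys).filter (fun y => key y == key x)
      = ys.filter (fun y => key y == key x) ++ [x] := by
  intro ys
  induction ys with
  | nil => simp [PySem.List.insertBy]
  | cons y ys ih =>
    intro h
    rw [List.pairwise_cons] at h
    simp only [PySem.List.insertBy]
    split
    · rename_i hlt
      simp only [decide_eq_true_eq] at hlt
      have hnil : (y :: ys).filter (fun y => key y == key x) = [] := by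
        rw [List.filter_eq_nil_iff]
        intro b hb
        have : key x < key b := by
          rcases List.mem_cons.mp hb with rfl | hb
          · exact hlt
          · exact lt_of_lt_of_le hlt (h.1 b hb)
        simp [ne_of_gt this]
      simp only [List.filter_cons, beq_self_eq_true, if_true, hnil]
      simp
    · rename_i hnlt
      simp only [List.filter_cons, ih h.2]
      by_cases hy : (key y == key x) = true
      · simp [hy]
      · simp [hy]

theorem pv_filter_foldl_insertBy {α κ : Type} [LinearOrder κ] [BEq κ] [LawfulBEq κ]
    (key : α → κ) (k : κ) :
    ∀ (xs : List α) (acc : List α), acc.Pairwise (fun a b => key a ≤ key b) →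
    (xs.foldl (fun acc x => PySem.List.insertBy (fun a b => decide (key a < key b)) x acc) acc).filter
        (fun y => key y == k)
      = acc.filter (fun y => key y == k) ++ xs.filter (fun x => key x == k) := by
  intro xs
  induction xs with
  | nil => intro acc _; simp
  | cons x xs ih =>
    intro acc hacc
    simp only [List.foldl_cons]
    rw [ih _ (pv_insertBy_pairwise key x acc hacc)]
    by_cases hx : key x = k
    · subst hx
      rw [pv_filter_insertBy_eq key x acc hacc]
      simp [List.filter_cons]
    · rw [pv_filter_insertBy_ne key x k hx acc]
      simp [hx]

theorem pv_filter_sorted {α κ : Type} [LinearOrder κ] [BEq κ] [LawfulBEq κ]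
    (xs : List α) (key : α → κ) (k : κ) :
    (PySem.List.sorted xs key).filter (fun x => key x == k) = xs.filter (fun x => key x == k) := by
  rw [PySem.List.sorted_eq_foldl_insertBy]
  simpa using pv_filter_foldl_insertBy key k xs [] (List.Pairwise.nil)
theorem pv_groupRuns_eq (L : List (String × String))
    (h : L.Pairwise (fun a b => a.1 ≤ b.1)) :
    pvGroupRuns L = (PySem.List.sorted (PySem.Set.ofList (L.map Prod.fst)) (fun k => k)).map
      (fun k => (k, (L.filter (fun p => p.1 == k)).map (fun p => p.2))) := by
  induction L using pvGroupRuns.induct with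
  | case1 => simp [pvGroupRuns, PySem.List.sorted_eq_nil_iff]
  | case2 k v rest ih =>
    rw [List.pairwise_cons] at h
    set T := rest.takeWhile (fun p => p.1 == k) with hT
    set D := rest.dropWhile (fun p => p.1 == k) with hD
    have hTD : T ++ D = rest := List.takeWhile_append_dropWhile
    have hTk : ∀ p ∈ T, p.1 = k := by
      intro p hp
      have := List.mem_takeWhile_imp hp
      simpa using this
    have hPD : D.Pairwise (fun a b => a.1 ≤ b.1) := by
      have : D.Sublist rest := List.dropWhile_sublist _
      exact h.2.sublist this
    have hDk : ∀ p ∈ D, k < p.1 := by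
      cases hDe : D with
      | nil => simp
      | cons d D' =>
        have hdne : (d.1 == k) = false := by
          have h0 := List.head?_dropWhile_not (fun p => p.1 == k) rest
          rw [← hD, hDe] at h0
          exact h0
        have hdmem : d ∈ rest := (List.dropWhile_sublist _).subset (by
          rw [← hD, hDe]; exact List.mem_cons_self)
        have hdnek : d.1 ≠ k := by
          intro hh; rw [hh] at hdne; simp at hdne
        have hdk : k < d.1 := lt_of_le_of_ne (h.1 d hdmem) (Ne.symm hdnek)
        intro p hp
        rcases List.mem_cons.mp hp with rfl | hp'
        · exact hdk
        · have : d.1 ≤ p.1 := by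
            rw [hDe] at hPD
            exact (List.pairwise_cons.mp hPD).1 p hp'
          exact lt_of_lt_of_le hdk this
    -- filter of L at k is the head run
    have hfk : ((k, v) :: rest).filter (fun p => p.1 == k) = (k, v) :: T := by
      rw [List.filter_cons_of_pos (by simp)]
      congr 1
      rw [← hTD, List.filter_append]
      have h1 : T.filter (fun p => p.1 == k) = T :=
        List.filter_eq_self.mpr (by intro p hp; simp [hTk p hp])
      have h2 : D.filter (fun p => p.1 == k) = [] :=
        List.filter_eq_nil_iff.mpr (by intro p hp; simpa using ne_of_gt (hDk p hp))
      simp [h1, h2]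
    -- filter of L at k' ≠ k (k < k') is filter of D
    have hfk' : ∀ k', k < k' → ((k, v) :: rest).filter (fun p => p.1 == k')
        = D.filter (fun p => p.1 == k') := by
      intro k' hkk'
      rw [List.filter_cons_of_neg (by simpa using ne_of_lt hkk'), ← hTD, List.filter_append]
      have h1 : T.filter (fun p => p.1 == k') = [] :=
        List.filter_eq_nil_iff.mpr (by
          intro p hp
          simp [hTk p hp, ne_of_lt hkk'])
      simp [h1]
    -- sorted distinct keys of L = k :: sorted distinct keys of D
    have hsk : PySem.List.sorted (PySem.Set.ofList (((k, v) :: rest).map Prod.fst)) (fun x => x)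
        = k :: PySem.List.sorted (PySem.Set.ofList (D.map Prod.fst)) (fun x => x) := by
      apply PySem.List.sorted_eq_of_perm_of_pairwise_lt
      · rw [List.perm_ext_iff_of_nodup]
        · intro a
          simp only [PySem.List.mem_sorted, PySem.Set.mem_ofList, List.mem_cons, List.map_cons]
          constructor
          · intro hmem
            rcases hmem with rfl | hmem
            · exact Or.inl rfl
            · obtain ⟨p, hp, hpa⟩ := List.mem_map.mp hmem
              refine Or.inr (List.mem_map.mpr ⟨p, ?_, hpa⟩)
              rw [← hTD]; exact List.mem_append_right _ hp
          · intro hmem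
            rcases hmem with rfl | hmem
            · exact Or.inl rfl
            · obtain ⟨p, hp, hpa⟩ := List.mem_map.mp hmem
              rw [← hTD] at hp
              rcases List.mem_append.mp hp with hp | hp
              · exact Or.inl ((hpa ▸ (hTk p hp) : a = k))
              · exact Or.inr (List.mem_map.mpr ⟨p, hp, hpa⟩)
        · refine List.nodup_cons.mpr ⟨?_, ?_⟩
          · intro hk
            simp only [PySem.List.mem_sorted, PySem.Set.mem_ofList, List.mem_map] at hk
            obtain ⟨p, hp, hpk⟩ := hk
            exact absurd hpk.symm (ne_of_lt (hDk p hp))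
          · exact ((PySem.List.sorted_perm _ _ _).nodup_iff).mpr (PySem.Set.nodup_ofList _)
        · exact PySem.Set.nodup_ofList _
      · refine List.pairwise_cons.mpr ⟨?_, PySem.List.sorted_ofList_pairwise_lt _⟩
        intro k' hk'
        simp only [PySem.List.mem_sorted, PySem.Set.mem_ofList, List.mem_map] at hk'
        obtain ⟨p, hp, hpk⟩ := hk'
        exact hpk ▸ hDk p hp
  
    rw [pvGroupRuns, hsk, List.map_cons]
    congr 1
    · rw [hfk]; rw [← hT]; simp
    · rw [ih hPD]
      apply List.map_congr_left
      intro k' hk'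
      have hkk' : k < k' := by
        have := (List.pairwise_cons.mp (hsk ▸ PySem.List.sorted_ofList_pairwise_lt
          (((k, v) :: rest).map Prod.fst))).1 k' hk'
        exact this
      rw [hfk' k' hkk']
theorem pv_gdict_keys (ps : List (String × String)) :
    (pvGDict ps).keys = PySem.Set.ofList (ps.map Prod.fst) := by
  have h := PySem.Dict.keys_foldl_modify_key (l := ps) (key := Prod.fst) (d0 := ([] : List String))
    (f := fun _ p vs => vs ++ [p.2]) (d := PySem.Dict.empty)
  simpa [pvGDict, PySem.Set.update, PySem.Set.ofList] using h

theorem pv_gdict_getD (ps : List (String × String)) (k : String) :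
    (pvGDict ps).getD k [] = (ps.filter (fun p => p.1 == k)).map (fun p => p.2) := by
  have h := PySem.Dict.getD_foldl_modify_append (l := ps) (d := PySem.Dict.empty) (c := k)
  simpa [pvGDict] using h

theorem pv_gdict_size (ps : List (String × String)) (hps : ps ≠ []) :
    (pvGDict ps).size ≠ 0 := by
  have hlen : (pvGDict ps).size = (pvGDict ps).keys.length := by
    simp [PySem.Dict.size, PySem.Dict.keys]
  rw [hlen, pv_gdict_keys]
  intro h0
  rw [List.length_eq_zero_iff] at h0
  cases ps with
  | nil => exact hps rfl
  | cons p t =>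
    have : p.1 ∈ PySem.Set.ofList ((p :: t).map Prod.fst) :=
      (PySem.Set.mem_ofList _ _).mpr (by simp)
    rw [h0] at this
    simp at this

theorem pv_filter_sorted_fst (ps : List (String × String)) (k : String) :
    (PySem.List.sorted ps (fun p => p.1)).filter (fun p => p.1 == k)
      = ps.filter (fun p => p.1 == k) :=
  pv_filter_sorted ps (fun p => p.1) k


-- ===== VERDICT (by name: the statement is the Claim_ definition above) =====
theorem ini_sort_content_spec : Claim_equal_ini_sort_content := by
  intro lines and_keys _
  unfold Spec_ini_sort_content
  simp only [ini_sort_content, ini_sort_content_alt]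
  have hrel := pv_scan_rel lines "" []
  simp only [] at hrel
  rw [show (PySem.Dict.empty : PySem.Dict String (List String)) = pvGDict [] from rfl, hrel]
  set ps := (lines.foldl (fun (st : String × List (String × String)) line =>
        let l := PySem.Str.strip line
        if l = "" then st
        else if PySem.Str.startswith l "[" then (l, st.2)
        else if st.1 ≠ "" then (st.1, st.2 ++ [(st.1, l)])
        else st) ("", [])).2 with hps0
  by_cases hps : ps = []
  · rw [if_pos hps, if_neg (by rw [hps]; simp [pvGDict, PySem.Dict.size_empty])]
  · rw [if_neg hps, if_pos (pv_gdict_size ps hps)]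
    congr 1
    dsimp only
    have hLpw : (PySem.List.sorted ps (fun p => p.1)).Pairwise (fun a b => a.1 ≤ b.1) := by
      have := PySem.List.sorted_pairwise ps (fun p => p.1)
      simpa using this
    rw [pv_groupRuns_eq _ hLpw]
    rw [PySem.List.foldl_append_eq_flatMap
      (g := fun (g : String × List String) => [g.1] ++ (if and_keys then PySem.List.sorted g.2 (fun v => v) else g.2) ++ [""])]
    simp only [List.append_assoc]
    rw [PySem.List.foldl_append_eq_flatMap]
    rw [List.flatMap_map]
    have hpm : (PySem.Set.ofList ((PySem.List.sorted ps (fun p => p.1)).map Prod.fst)).Perm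
        (PySem.Set.ofList (ps.map Prod.fst)) := by
      rw [List.perm_ext_iff_of_nodup (PySem.Set.nodup_ofList _) (PySem.Set.nodup_ofList _)]
      intro a
      simp only [PySem.Set.mem_ofList]
      exact ((PySem.List.sorted_perm ps (fun p => p.1) false).map Prod.fst).mem_iff
    have hsk : PySem.List.sorted (PySem.Set.ofList ((PySem.List.sorted ps (fun p => p.1)).map Prod.fst)) (fun k => k)
        = PySem.List.sorted (PySem.Set.ofList (ps.map Prod.fst)) (fun k => k) :=
      PySem.List.sorted_eq_sorted_of_perm _ _ _ (fun a b h => h) hpm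
    rw [pv_gdict_keys, hsk]
    simp only [List.nil_append]
    congr 1
    funext k
    simp [pv_gdict_getD, pv_filter_sorted_fst]
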